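-- pv_equiv track=rewrite | github.com/Digs003/EPOS-Visualizer | scripts/preprocess.py | build_tree_edges
-- ===== SOURCE A (Python) =====
-- def build_tree_edges(num_agents: int, num_children: int = 2) -> list:
--     """Build the binary tree edge list for EPOS's balanced tree."""
--     edges = []
--     for pos in range(num_agents):
--         agent_id = num_agents - 1 - pos
--         for c in range(1, num_children + 1):
--             child_pos = pos * num_children + c
--             if child_pos < num_agents:
--                 child_agent_id = num_agents - 1 - child_pos
--                 edges.append([agent_id, child_agent_id])
--     return edges
-- ===== SOURCE B (Python) =====
-- def build_tree_edges(num_agents: int, num_children: int = 2) -> list: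
--     """Build the binary tree edge list for EPOS's balanced tree."""
--     if num_children < 1:
--         return []
--     return [[num_agents - 1 - (child - 1) // num_children, num_agents - 1 - child]
--             for child in range(1, num_agents)]
-- ===== Notes on version B (the rewrite author's own statement) =====
-- stated objective: simpler
-- what changed: Replaces the nested parent-loop with bound check by one flat comprehension over every non-root position as a child, computing its parent as (child-1)//num_children.
import Mathlib
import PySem

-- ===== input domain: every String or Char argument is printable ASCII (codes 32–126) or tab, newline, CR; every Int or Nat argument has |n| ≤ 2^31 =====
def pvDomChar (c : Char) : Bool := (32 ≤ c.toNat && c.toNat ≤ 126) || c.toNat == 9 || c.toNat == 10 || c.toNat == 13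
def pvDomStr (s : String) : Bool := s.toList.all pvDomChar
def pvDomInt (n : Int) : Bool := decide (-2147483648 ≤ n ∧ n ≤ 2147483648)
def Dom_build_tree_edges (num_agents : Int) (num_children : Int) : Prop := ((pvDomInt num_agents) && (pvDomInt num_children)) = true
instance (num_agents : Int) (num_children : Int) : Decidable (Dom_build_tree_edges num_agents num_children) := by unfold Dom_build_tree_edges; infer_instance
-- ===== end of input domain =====

-- B replaces A's nested parent-loop (with per-child bound check) by one flat pass over
-- each non-root position as a child, computing its parent by floor division: simpler, one loop.

-- ===== PORT A =====
def build_tree_edges (num_agents : Int) (num_children : Int) : List (List Int) :=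
  (PySem.List.pyRange 0 num_agents 1).foldl (fun edges pos =>
    let agent_id := num_agents - 1 - pos
    (PySem.List.pyRange 1 (num_children + 1) 1).foldl (fun edges c =>
      let child_pos := pos * num_children + c
      if child_pos < num_agents then
        edges ++ [[agent_id, num_agents - 1 - child_pos]]
      else edges) edges) []

-- ===== PORT B =====
def build_tree_edges_alt (num_agents : Int) (num_children : Int) : List (List Int) :=
  if num_children < 1 then []
  else (PySem.List.pyRange 1 num_agents 1).map (fun child =>
    [num_agents - 1 - PySem.Int.floordiv (child - 1) num_children, num_agents - 1 - child])

-- ===== PRECONDITION & SPEC =====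
def Spec_build_tree_edges (num_agents : Int) (num_children : Int) (out : List (List Int)) : Prop := out = build_tree_edges_alt num_agents num_children
instance (num_agents : Int) (num_children : Int) (out : List (List Int)) : Decidable (Spec_build_tree_edges num_agents num_children out) := by unfold Spec_build_tree_edges; infer_instance

-- ===== CLAIM (what is proved, stated in full; the proofs are below) =====
def Claim_equal_build_tree_edges : Prop := ∀ (num_agents : Int) (num_children : Int), Dom_build_tree_edges num_agents num_children → Spec_build_tree_edges num_agents num_children (build_tree_edges num_agents num_children)

-- ===== LEMMAS AND PROOFS =====

-- A's inner loop over c ∈ [a, k] appends exactly the children p*k+a … min(p*k+k, n-1)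
theorem pv_inner_fold (n k p : Int) (a : Int) (acc : List (List Int)) :
    (PySem.List.pyRange a (k + 1) 1).foldl (fun edges c =>
        if p * k + c < n then edges ++ [[n - 1 - p, n - 1 - (p * k + c)]] else edges) acc
      = acc ++ (PySem.List.pyRange (p * k + a) (min (p * k + k + 1) n) 1).map
          (fun child => [n - 1 - p, n - 1 - child]) := by
  generalize hq : (k + 1 - a).toNat = q
  induction q generalizing a acc with
  | zero =>
      rw [PySem.List.pyRange_one_eq_nil (by omega), PySem.List.pyRange_one_eq_nil (by omega)]
      simp
  | succ q ih =>
      rw [PySem.List.pyRange_one_cons (by omega)]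
      simp only [List.foldl_cons]
      by_cases hc : p * k + a < n
      · rw [if_pos hc, ih (a + 1) _ (by omega)]
        rw [PySem.List.pyRange_one_cons (by omega : p * k + a < min (p * k + k + 1) n)]
        simp [add_assoc]
      · rw [if_neg hc, ih (a + 1) _ (by omega)]
        rw [PySem.List.pyRange_one_eq_nil (by omega), PySem.List.pyRange_one_eq_nil (by omega)]

-- A's outer loop over the first q parent positions produces exactly B's edges for
-- all children 1 … min (q*k) (n-1)
theorem pv_outer_fold (n k : Int) (hk : 0 < k) (q : Nat) (acc : List (List Int)) :
    (PySem.List.pyRange 0 (q : Int) 1).foldl (fun edges pos =>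
        (PySem.List.pyRange 1 (k + 1) 1).foldl (fun edges c =>
          if pos * k + c < n then edges ++ [[n - 1 - pos, n - 1 - (pos * k + c)]] else edges) edges) acc
      = acc ++ (PySem.List.pyRange 1 (min ((q : Int) * k + 1) n) 1).map
          (fun child => [n - 1 - PySem.Int.floordiv (child - 1) k, n - 1 - child]) := by
  induction q generalizing acc with
  | zero =>
      simp only [Nat.cast_zero, zero_mul, zero_add]
      rw [PySem.List.pyRange_one_eq_nil (le_refl (0 : Int))]
      rw [PySem.List.pyRange_one_eq_nil (show min 1 n ≤ 1 by omega)]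
      simp
  | succ q ih =>
      have hcast : ((q + 1 : Nat) : Int) = (q : Int) + 1 := by push_cast; ring
      rw [hcast, show PySem.List.pyRange 0 ((q : Int) + 1) 1
            = PySem.List.pyRange 0 (q : Int) 1 ++ [(q : Int)] from
          PySem.List.pyRange_one_succ_right (by omega)]
      rw [List.foldl_append, ih]
      simp only [List.foldl_cons, List.foldl_nil]
      rw [pv_inner_fold n k (q : Int) 1]
      have hmap : (PySem.List.pyRange ((q : Int) * k + 1) (min ((q : Int) * k + k + 1) n) 1).map
            (fun child => [n - 1 - (q : Int), n - 1 - child])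
          = (PySem.List.pyRange ((q : Int) * k + 1) (min ((q : Int) * k + k + 1) n) 1).map
            (fun child => [n - 1 - PySem.Int.floordiv (child - 1) k, n - 1 - child]) := by
        apply List.map_congr_left
        intro child hmem
        rw [PySem.List.mem_pyRange_one] at hmem
        have hfd : PySem.Int.floordiv (child - 1) k = (q : Int) := by
          rw [PySem.Int.floordiv_eq_iff_of_pos hk]
          have h1 : ((q : Int) + 1) * k = (q : Int) * k + k := by ring
          omega
        rw [hfd]
      rw [hmap]
      have hr : (((q : Int) + 1) * k + 1) = (q : Int) * k + k + 1 := by ring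
      rw [hr]
      have hqk : 0 ≤ (q : Int) * k := mul_nonneg (by omega) (by omega)
      by_cases h : (q : Int) * k + 1 ≤ n
      · rw [min_eq_left (by omega)]
        rw [PySem.List.pyRange_one_append 1 ((q : Int) * k + 1) (min ((q : Int) * k + k + 1) n)
              (by omega) (by omega)]
        simp
      · rw [PySem.List.pyRange_one_eq_nil (by omega : min ((q : Int) * k + k + 1) n ≤ (q : Int) * k + 1)]
        rw [min_eq_right (by omega : n ≤ (q : Int) * k + 1), min_eq_right (by omega)]
        simp

-- with no children per parent, A's loops append nothing
theorem pv_foldl_const (l : List Int) (acc : List (List Int)) :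
    l.foldl (fun (edges : List (List Int)) (_ : Int) => edges) acc = acc := by
  induction l generalizing acc with
  | nil => rfl
  | cons x xs ih => exact ih acc

-- ===== VERDICT (by name: the statement is the Claim_ definition above) =====
theorem build_tree_edges_spec : Claim_equal_build_tree_edges := by
  intro n k _
  show build_tree_edges n k = build_tree_edges_alt n k
  show (PySem.List.pyRange 0 n 1).foldl (fun edges pos =>
      (PySem.List.pyRange 1 (k + 1) 1).foldl (fun edges c =>
        if pos * k + c < n then edges ++ [[n - 1 - pos, n - 1 - (pos * k + c)]] else edges) edges) []
    = build_tree_edges_alt n k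
  unfold build_tree_edges_alt
  by_cases hk : k < 1
  · rw [if_pos hk]
    rw [PySem.List.pyRange_one_eq_nil (by omega : k + 1 ≤ 1)]
    simp only [List.foldl_nil]
    exact pv_foldl_const _ _
  · rw [if_neg hk]
    have hk' : 0 < k := by omega
    by_cases hn : n ≤ 0
    · rw [PySem.List.pyRange_one_eq_nil hn, PySem.List.pyRange_one_eq_nil (by omega : n ≤ 1)]
      rfl
    · have hq : ((n.toNat : Int)) = n := by omega
      have h := pv_outer_fold n k hk' n.toNat []
      rw [hq] at h
      have hmin : min (n * k + 1) n = n := by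
        have : n * 1 ≤ n * k := by
          exact mul_le_mul_of_nonneg_left (by omega) (by omega)
        omega
      rw [hmin] at h
      simpa using h
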